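-- pv_equiv track=rewrite | github.com/FancyXun/leetcode | stone.py | allTwoDiff
-- ===== SOURCE A (Python) =====
-- def allTwoDiff(nums, target):
--     """
--     使用map 降低寻址复杂度
--     """
--     head = {}
--     res = []
--     for idx, num in enumerate(nums):
--         if (target + num) in head:
--             for j in head[target + num]:
--                 res.append((j, idx))
--         if (-target + num) in head:
--             for j in head[-target + num]:
--                 res.append((j, idx))
--         # 考虑到数字的重复，所以需要一个List来存取所有的相同value的index
--         if nums[idx] in head:
--             head[nums[idx]].append(idx)
--         else:
--             head[nums[idx]] = [idx]
--     return res
-- ===== SOURCE B (Python) =====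
-- def allTwoDiff(nums, target):
--     res = []
--     for idx in range(len(nums)):
--         for j in range(idx):
--             if nums[j] == target + nums[idx]:
--                 res.append((j, idx))
--         for j in range(idx):
--             if nums[j] == nums[idx] - target:
--                 res.append((j, idx))
--     return res
-- ===== Notes on version B (the rewrite author's own statement) =====
-- stated objective: simpler
-- what changed: Replaced the value->indices hashmap with a direct nested double scan over earlier indices (two inner loops preserving A's emission order), removing the dict bookkeeping entirely.
import Mathlib
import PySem

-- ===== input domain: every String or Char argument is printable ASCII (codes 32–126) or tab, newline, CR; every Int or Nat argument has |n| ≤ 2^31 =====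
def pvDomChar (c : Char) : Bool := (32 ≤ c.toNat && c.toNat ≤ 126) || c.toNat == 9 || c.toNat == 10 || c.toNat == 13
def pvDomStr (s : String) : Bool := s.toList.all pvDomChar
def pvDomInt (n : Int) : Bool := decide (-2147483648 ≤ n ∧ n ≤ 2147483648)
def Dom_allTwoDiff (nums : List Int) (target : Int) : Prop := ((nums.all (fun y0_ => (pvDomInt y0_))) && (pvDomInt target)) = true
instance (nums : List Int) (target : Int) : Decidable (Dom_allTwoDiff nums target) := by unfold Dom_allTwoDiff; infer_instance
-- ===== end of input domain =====

-- B replaces A's value→indices dict with a plain nested double scan over earlier indices (simpler, no table bookkeeping); same output, order and all.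

-- ===== PORT A =====
-- loop body of A's 'for idx, num in enumerate(nums)'; state = (head, res).
-- 'nums[idx]' is ported as 'num' (exact: enumerate guarantees nums[idx] == num);
-- 'for j in head[v]: res.append((j, idx))' is the foldl appending singletons.
def allTwoDiffLoop (target : Int) (st : PySem.Dict Int (List Int) × List (Int × Int))
    (p : Int × Int) : PySem.Dict Int (List Int) × List (Int × Int) :=
  let idx := p.1
  let num := p.2
  let head := st.1
  let res := st.2
  let res := if head.contains (target + num) then
      (head.getD (target + num) []).foldl (fun r j => r ++ [(j, idx)]) res
    else res
  let res := if head.contains (-target + num) then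
      (head.getD (-target + num) []).foldl (fun r j => r ++ [(j, idx)]) res
    else res
  let head := if head.contains num then head.insert num (head.getD num [] ++ [idx])
    else head.insert num [idx]
  (head, res)

def allTwoDiff (nums : List Int) (target : Int) : List (Int × Int) :=
  ((PySem.List.enumerate nums).foldl (allTwoDiffLoop target) (PySem.Dict.empty, [])).2

-- ===== PORT B =====
def allTwoDiff_alt (nums : List Int) (target : Int) : List (Int × Int) :=
  (PySem.List.pyRange 0 nums.length 1).foldl (fun res idx =>
    let res := (PySem.List.pyRange 0 idx 1).foldl (fun r j =>
      if PySem.List.pyGetD nums j 0 = target + PySem.List.pyGetD nums idx 0 then r ++ [(j, idx)] else r) res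
    (PySem.List.pyRange 0 idx 1).foldl (fun r j =>
      if PySem.List.pyGetD nums j 0 = PySem.List.pyGetD nums idx 0 - target then r ++ [(j, idx)] else r) res) []

-- ===== PRECONDITION & SPEC =====
def Spec_allTwoDiff (nums : List Int) (target : Int) (out : List (Int × Int)) : Prop := out = allTwoDiff_alt nums target
instance (nums : List Int) (target : Int) (out : List (Int × Int)) : Decidable (Spec_allTwoDiff nums target out) := by unfold Spec_allTwoDiff; infer_instance

-- ===== CLAIM (what is proved, stated in full; the proofs are below) =====
def Claim_equal_allTwoDiff : Prop := ∀ (nums : List Int) (target : Int), Dom_allTwoDiff nums target → Spec_allTwoDiff nums target (allTwoDiff nums target)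

-- ===== LEMMAS AND PROOFS =====

-- enumerate over a snoc appends one indexed pair
theorem enumerate_append_singleton (xs : List Int) (x : Int) (s : Int) :
    PySem.List.enumerate (xs ++ [x]) s = PySem.List.enumerate xs s ++ [(s + xs.length, x)] := by
  induction xs generalizing s with
  | nil => simp [PySem.List.enumerate_nil, PySem.List.enumerate_cons]
  | cons y ys ih =>
      simp [PySem.List.enumerate_cons, ih]
      ring_nf

-- lookup in A's updated head
theorem step_getD (d : PySem.Dict Int (List Int)) (num i v : Int) :
    ((if d.contains num then d.insert num (d.getD num [] ++ [i]) else d.insert num [i]).getD v [])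
      = if v = num then d.getD num [] ++ [i] else d.getD v [] := by
  cases h : d.contains num with
  | true => simp [PySem.Dict.getD_insert]
  | false =>
      simp [PySem.Dict.getD_insert]
      split_ifs with hv
      · subst hv
        rw [PySem.Dict.getD_of_not_contains (d := d) (h := h)]
        simp
      · rfl

-- A's res update at one step reads the dict via getD, contains or not
theorem resStep_eq (d : PySem.Dict Int (List Int)) (v i : Int) (res : List (Int × Int)) :
    (if d.contains v then (d.getD v []).foldl (fun r j => r ++ [(j, i)]) res else res)
      = res ++ (d.getD v []).map (fun j => (j, i)) := by
  cases h : d.contains v with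
  | true =>
      rw [if_pos rfl, PySem.List.foldl_append_singleton_eq_map]
  | false =>
      rw [if_neg (by simp), PySem.Dict.getD_of_not_contains (d := d) (h := h)]
      simp

-- the main loop invariant, by induction on the processed prefix length
theorem prefix_invariant (nums : List Int) (target : Int) : ∀ k : Nat, k ≤ nums.length →
    (∀ v, (((PySem.List.enumerate (nums.take k)).foldl (allTwoDiffLoop target)
        (PySem.Dict.empty, [])).1.getD v [])
      = (PySem.List.pyRange 0 k 1).filter (fun j => PySem.List.pyGetD nums j 0 == v))
    ∧ ((PySem.List.enumerate (nums.take k)).foldl (allTwoDiffLoop target)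
        (PySem.Dict.empty, [])).2
      = (PySem.List.pyRange 0 k 1).foldl (fun res idx =>
          let res := (PySem.List.pyRange 0 idx 1).foldl (fun r j =>
            if PySem.List.pyGetD nums j 0 = target + PySem.List.pyGetD nums idx 0 then r ++ [(j, idx)] else r) res
          (PySem.List.pyRange 0 idx 1).foldl (fun r j =>
            if PySem.List.pyGetD nums j 0 = PySem.List.pyGetD nums idx 0 - target then r ++ [(j, idx)] else r) res) [] := by
  intro k
  induction k with
  | zero =>
      intro _
      constructor
      · intro v
        simp [PySem.List.pyRange_one_eq_nil, PySem.List.enumerate_nil, PySem.Dict.getD_empty]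
      · simp [PySem.List.pyRange_one_eq_nil, PySem.List.enumerate_nil]
  | succ k ih =>
      intro hk
      have hklt : k < nums.length := hk
      obtain ⟨ih1, ih2⟩ := ih (Nat.le_of_lt hklt)
      have htake : nums.take (k+1) = nums.take k ++ [nums[k]] := by
        rw [List.take_add_one]
        simp [List.getElem?_eq_getElem hklt]
      have henum : PySem.List.enumerate (nums.take (k+1)) 0
          = PySem.List.enumerate (nums.take k) 0 ++ [((k : Int), nums[k])] := by
        rw [htake, enumerate_append_singleton]
        simp [Nat.le_of_lt hklt]
      have hrange : PySem.List.pyRange 0 ((k:Nat)+1 : Nat) 1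
          = PySem.List.pyRange 0 k 1 ++ [(k : Int)] := by
        push_cast
        rw [PySem.List.pyRange_one_succ_right (by positivity)]
      have hget : PySem.List.pyGetD nums (k : Int) 0 = nums[k] := by
        rw [PySem.List.pyGetD_natCast]
        exact List.getD_eq_getElem nums 0 hklt
      rw [henum, List.foldl_append]
      simp only [List.foldl_cons, List.foldl_nil]
      set S := (PySem.List.enumerate (nums.take k) 0).foldl (allTwoDiffLoop target)
          (PySem.Dict.empty, []) with hS
      constructor
      · intro v
        show ((if S.1.contains nums[k] then S.1.insert nums[k] (S.1.getD nums[k] [] ++ [(k:Int)])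
            else S.1.insert nums[k] [(k:Int)]).getD v []) = _
        rw [step_getD, hrange, List.filter_append]
        by_cases hv : v = nums[k]
        · subst hv
          rw [if_pos rfl, ih1]
          simp [hget]
        · rw [if_neg hv, ih1]
          simp only [List.filter_cons, List.filter_nil, hget]
          have : (nums[k] == v) = false := by simp [Ne.symm hv]
          simp [this]
      · show ((if S.1.contains (-target + nums[k]) then _ else _) : List (Int × Int)) = _
        have hfold : ∀ (t : Int) (acc : List (Int × Int)),
            (PySem.List.pyRange 0 (k:Int) 1).foldl
              (fun r j => if PySem.List.pyGetD nums j 0 = t then r ++ [(j, (k:Int))] else r) acc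
            = acc ++ ((PySem.List.pyRange 0 (k:Int) 1).filter
                (fun j => PySem.List.pyGetD nums j 0 == t)).map (fun j => (j, (k:Int))) := by
          intro t acc
          have h := PySem.List.foldl_append_if (p := fun j => PySem.List.pyGetD nums j 0 == t)
            (f := fun j => (j, (k:Int))) (l := PySem.List.pyRange 0 (k:Int) 1) (acc := acc)
          simpa using h
        rw [resStep_eq, resStep_eq, hrange, List.foldl_append]
        simp only [List.foldl_cons, List.foldl_nil, hget]
        rw [hfold, hfold, ih2, ih1, ih1]
        have : -target + nums[k] = nums[k] - target := by ring
        rw [this, List.append_assoc]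
-- ===== VERDICT (by name: the statement is the Claim_ definition above) =====
theorem allTwoDiff_spec : Claim_equal_allTwoDiff := by
  intro nums target _
  unfold Spec_allTwoDiff allTwoDiff allTwoDiff_alt
  have h := (prefix_invariant nums target nums.length le_rfl).2
  simpa using h
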